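-- pv_equiv track=rewrite | github.com/FraLiturri/Project-Euler | 101-125/112.py | is_bouncing
-- ===== SOURCE A (Python) =====
-- def is_bouncing(n):
--     str_n = str(n)
--     is_decr = False
--     is_incr = False
--
--     for i in range(0, len(str_n) - 1):
--         if str_n[i] < str_n[i + 1]:
--             is_incr = True
--         if str_n[i] > str_n[i + 1]:
--             is_decr = True
--
--     if is_decr and is_incr:
--         return True
--
--     else:
--         return False
-- ===== SOURCE B (Python) =====
-- def is_bouncing(n):
--     s = str(n)
--     return s != ''.join(sorted(s)) and s != ''.join(sorted(s, reverse=True))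
-- ===== Notes on version B (the rewrite author's own statement) =====
-- stated objective: simpler
-- what changed: Replaces the index loop with two flags by comparing str(n) against its sorted and reverse-sorted forms (bouncing = neither monotone).
import Mathlib
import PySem

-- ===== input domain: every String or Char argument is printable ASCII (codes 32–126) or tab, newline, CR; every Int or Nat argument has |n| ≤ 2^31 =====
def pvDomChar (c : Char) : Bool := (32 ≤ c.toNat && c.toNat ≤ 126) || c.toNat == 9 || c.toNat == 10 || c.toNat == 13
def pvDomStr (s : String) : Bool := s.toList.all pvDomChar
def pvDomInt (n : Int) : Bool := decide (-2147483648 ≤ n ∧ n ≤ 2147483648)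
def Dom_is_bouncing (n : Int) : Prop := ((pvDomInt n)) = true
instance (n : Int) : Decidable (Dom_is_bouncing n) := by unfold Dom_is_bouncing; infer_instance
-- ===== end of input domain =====

-- B: compares str(n) against its sorted and reverse-sorted forms instead of A's two-flag adjacent scan (simpler).
-- ===== PORT A =====
def is_bouncing (n : Int) : Bool :=
  let str_n := PySem.Int.toChars n
  let res := (PySem.List.pyRange 0 ((str_n.length : Int) - 1) 1).foldl
    (fun (acc : Bool × Bool) i =>
      let c1 := PySem.List.pyGetD str_n i ' '
      let c2 := PySem.List.pyGetD str_n (i+1) ' '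
      (acc.1 || decide (c2 < c1), acc.2 || decide (c1 < c2)))
    (false, false)
  res.1 && res.2

-- ===== PORT B =====
def is_bouncing_alt (n : Int) : Bool :=
  let s := PySem.Int.toChars n
  decide (s ≠ PySem.List.sorted s (fun c => c) false) && decide (s ≠ PySem.List.sorted s (fun c => c) true)

-- ===== PRECONDITION & SPEC =====
def Spec_is_bouncing (n : Int) (out : Bool) : Prop := out = is_bouncing_alt n
instance (n : Int) (out : Bool) : Decidable (Spec_is_bouncing n out) := by unfold Spec_is_bouncing; infer_instance

-- ===== CLAIM (what is proved, stated in full; the proofs are below) =====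
def Claim_equal_is_bouncing : Prop := ∀ (n : Int), Dom_is_bouncing n → Spec_is_bouncing n (is_bouncing n)

-- ===== LEMMAS AND PROOFS =====
-- flags fold = two any's
theorem foldl_or_pair {α : Type} (xs : List α) (q1 q2 : α → Bool) (acc : Bool × Bool) :
    xs.foldl (fun acc x => (acc.1 || q1 x, acc.2 || q2 x)) acc = (acc.1 || xs.any q1, acc.2 || xs.any q2) := by
  induction xs generalizing acc with
  | nil => simp
  | cons x xs ih => simp [List.foldl_cons, ih, Bool.or_assoc]

theorem any_desc (l : List Char) :
    (List.range (l.length - 1)).any (fun k => decide (l.getD (k+1) ' ' < l.getD k ' '))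
      = decide (¬ l.IsChain (· ≤ ·)) := by
  rw [Bool.eq_iff_iff]
  simp only [List.any_eq_true, List.mem_range, decide_eq_true_eq, List.isChain_iff_getElem,
    not_forall, not_le]
  constructor
  · rintro ⟨k, hk, h⟩
    have h1 : k < l.length := by omega
    have h2 : k + 1 < l.length := by omega
    exact ⟨k, h2, by rwa [List.getD_eq_getElem l ' ' h1, List.getD_eq_getElem l ' ' h2] at h⟩
  · rintro ⟨k, hk, h⟩
    have h1 : k < l.length := by omega
    exact ⟨k, by omega, by rwa [List.getD_eq_getElem l ' ' h1, List.getD_eq_getElem l ' ' hk]⟩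

theorem any_asc (l : List Char) :
    (List.range (l.length - 1)).any (fun k => decide (l.getD k ' ' < l.getD (k+1) ' '))
      = decide (¬ l.IsChain (fun a b => b ≤ a)) := by
  rw [Bool.eq_iff_iff]
  simp only [List.any_eq_true, List.mem_range, decide_eq_true_eq, List.isChain_iff_getElem,
    not_forall, not_le]
  constructor
  · rintro ⟨k, hk, h⟩
    have h1 : k < l.length := by omega
    have h2 : k + 1 < l.length := by omega
    exact ⟨k, h2, by rwa [List.getD_eq_getElem l ' ' h1, List.getD_eq_getElem l ' ' h2] at h⟩
  · rintro ⟨k, hk, h⟩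
    have h1 : k < l.length := by omega
    exact ⟨k, by omega, by rwa [List.getD_eq_getElem l ' ' h1, List.getD_eq_getElem l ' ' hk]⟩

theorem ne_sorted_asc (l : List Char) :
    (l ≠ PySem.List.sorted l (fun c => c) false) ↔ ¬ l.IsChain (· ≤ ·) := by
  rw [List.isChain_iff_pairwise]
  constructor
  · intro h hp; exact h (PySem.List.sorted_eq_self_of_pairwise l (fun c => c) hp).symm
  · intro h he; exact h (he ▸ PySem.List.sorted_pairwise l (fun c => c))

theorem ne_sorted_desc (l : List Char) :
    (l ≠ PySem.List.sorted l (fun c => c) true) ↔ ¬ l.IsChain (fun a b => b ≤ a) := by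
  rw [@List.isChain_iff_pairwise _ (fun a b => b ≤ a) _ { trans := fun h1 h2 => le_trans h2 h1 }]
  constructor
  · intro h hp; exact h (PySem.List.sorted_rev_eq_self_of_pairwise l (fun c => c) hp).symm
  · intro h he; exact h (he ▸ PySem.List.sorted_pairwise_rev l (fun c => c))

theorem main (n : Int) : is_bouncing n = is_bouncing_alt n := by
  unfold is_bouncing is_bouncing_alt
  dsimp only
  set l := PySem.Int.toChars n with hl
  rw [PySem.List.pyRange_one]
  rw [List.foldl_map]
  simp only [zero_add]
  have hcast : ∀ k : Nat, ((k : Int) + 1) = ((k + 1 : Nat) : Int) := by intro k; push_cast; ring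
  simp only [hcast, PySem.List.pyGetD_natCast]
  rw [foldl_or_pair]
  have hn : ((l.length : Int) - 1 - 0).toNat = l.length - 1 := by omega
  rw [hn]
  simp only [Bool.false_or]
  rw [any_desc, any_asc]
  rw [Bool.eq_iff_iff]
  simp only [Bool.and_eq_true, decide_eq_true_eq, ne_sorted_asc, ne_sorted_desc]

-- ===== VERDICT (by name: the statement is the Claim_ definition above) =====
theorem is_bouncing_spec : Claim_equal_is_bouncing := by
  intro n _
  unfold Spec_is_bouncing
  exact main n
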